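-- pv_equiv track=rewrite | github.com/fixxxera/Laina | Scripts/carnival-au.py | match_by_meta
-- ===== SOURCE A (Python) =====
-- def match_by_meta(param):
--     australia = ['Airlie Beach', 'Akaroa', 'Auckland', 'Bay Of Islands', 'Brisbane', 'Darwin', 'Fiordland Pk', 'Hobart',
--                  'Melbourne', 'Mooloolaba', 'Moreton Island', 'Napier', 'Port Arthur', 'Port Douglas', 'Pt. Chalmers',
--                  'Sydney', 'Tauranga', 'Wellington', 'Willis Island', 'Yorkeys Knob (Caims']
--     exotics = ['Bali (Bebia)', 'Ho Chi Minh City (Ph', 'Ko Samui', 'Singapore']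
--     south_pacific_all = ['Bora Bora', 'Isle Of Pines', 'Lifou Isle', 'Mare', 'Moorea', 'Mystery Island', 'Noumea',
--                          'Papeete', 'Port Denarau', 'Santo', 'Suva', 'Vila']
--     ports_visited = param
--
--     ports_list = []
--     for i in range(len(ports_visited)):
--
--         if i == 0:
--             pass
--         else:
--             ports_list.append(ports_visited[i]['PortName'])
--     result = []
--     is_exotic = False
--     is_pacific = False
--     for element in exotics:
--         if element in ports_list:
--             is_exotic = True
--     if not is_exotic:
--         for element in south_pacific_all:
--             if element in ports_list:
--                 is_pacific = True
--     if not is_pacific: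
--         for element in australia:
--             if element in ports_list:
--                 pass
--     if is_exotic:
--         result.append("Exotics")
--         result.append("O")
--         return result
--     elif is_pacific:
--         result.append("South Pacific -- All")
--         result.append("I")
--         return result
--     else:
--         result.append("Australia")
--         result.append("P")
--         return result
-- ===== SOURCE B (Python) =====
-- def match_by_meta(param):
--     region = {}
--     for p in ['Airlie Beach', 'Akaroa', 'Auckland', 'Bay Of Islands', 'Brisbane', 'Darwin', 'Fiordland Pk', 'Hobart',
--               'Melbourne', 'Mooloolaba', 'Moreton Island', 'Napier', 'Port Arthur', 'Port Douglas', 'Pt. Chalmers',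
--               'Sydney', 'Tauranga', 'Wellington', 'Willis Island', 'Yorkeys Knob (Caims']:
--         region[p] = 'P'
--     for p in ['Bora Bora', 'Isle Of Pines', 'Lifou Isle', 'Mare', 'Moorea', 'Mystery Island', 'Noumea',
--               'Papeete', 'Port Denarau', 'Santo', 'Suva', 'Vila']:
--         region[p] = 'I'
--     for p in ['Bali (Bebia)', 'Ho Chi Minh City (Ph', 'Ko Samui', 'Singapore']:
--         region[p] = 'O'
--     is_exotic = False
--     is_pacific = False
--     for port in param[1:]:
--         code = region.get(port['PortName'])
--         if code == 'O':
--             is_exotic = True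
--         elif code == 'I':
--             is_pacific = True
--     if is_exotic:
--         return ['Exotics', 'O']
--     elif is_pacific:
--         return ['South Pacific -- All', 'I']
--     else:
--         return ['Australia', 'P']
-- ===== Notes on version B (the rewrite author's own statement) =====
-- stated objective: alternative
-- what changed: B builds one port-name-to-region-code dict from the three constant lists and sets both flags in a single pass over param[1:], instead of A's building an intermediate ports_list and then scanning it once per element of each category list.
import Mathlib
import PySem

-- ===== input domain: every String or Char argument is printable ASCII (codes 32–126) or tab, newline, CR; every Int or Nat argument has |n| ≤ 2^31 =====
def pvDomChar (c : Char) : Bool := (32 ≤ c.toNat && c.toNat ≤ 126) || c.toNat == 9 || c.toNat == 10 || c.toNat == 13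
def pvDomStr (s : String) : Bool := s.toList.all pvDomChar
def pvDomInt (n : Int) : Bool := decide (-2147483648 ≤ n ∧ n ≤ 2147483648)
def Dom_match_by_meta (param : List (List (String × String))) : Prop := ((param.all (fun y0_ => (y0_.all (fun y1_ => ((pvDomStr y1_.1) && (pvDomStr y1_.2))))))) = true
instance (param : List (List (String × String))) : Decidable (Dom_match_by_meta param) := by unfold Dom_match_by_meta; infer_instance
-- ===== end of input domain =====

-- B replaces A's repeated scans of the three constant category lists over ports_list with one
-- port→region-code dict and a single flag-setting pass over param[1:] (objective: alternative decomposition).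
-- Both implementations raise KeyError when a non-first element lacks 'PortName'; Pre_ excludes exactly those inputs.

-- ===== PORT A =====
-- shared constant lists (module constants of the Python function)
def pvAustralia : List String := ["Airlie Beach", "Akaroa", "Auckland", "Bay Of Islands", "Brisbane", "Darwin", "Fiordland Pk", "Hobart", "Melbourne", "Mooloolaba", "Moreton Island", "Napier", "Port Arthur", "Port Douglas", "Pt. Chalmers", "Sydney", "Tauranga", "Wellington", "Willis Island", "Yorkeys Knob (Caims"]
def pvExotics : List String := ["Bali (Bebia)", "Ho Chi Minh City (Ph", "Ko Samui", "Singapore"]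
def pvSouthPacific : List String := ["Bora Bora", "Isle Of Pines", "Lifou Isle", "Mare", "Moorea", "Mystery Island", "Noumea", "Papeete", "Port Denarau", "Santo", "Suva", "Vila"]

-- d['PortName'] on the association-list dict: first matching key (none = KeyError, excluded by Pre_;
-- the port then uses '' as the placeholder value, never reached inside Pre_)
def pvPortName (d : List (String × String)) : Option String :=
  (d.find? (fun kv => kv.1 == "PortName")).map (·.2)

def match_by_meta (param : List (List (String × String))) : List String :=
  let ports_visited := param
  -- for i in range(len(ports_visited)): if i == 0: pass else: ports_list.append(ports_visited[i]['PortName'])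
  let ports_list := (PySem.List.pyRange 0 (ports_visited.length : Int) 1).foldl
    (fun acc i => if i == 0 then acc
                  else acc ++ [(pvPortName (PySem.List.pyGetD ports_visited i [])).getD ""]) []
  let is_exotic := pvExotics.foldl (fun b element => if ports_list.contains element then true else b) false
  let is_pacific := if !is_exotic
    then pvSouthPacific.foldl (fun b element => if ports_list.contains element then true else b) false
    else false
  -- (A's third loop over australia has an empty body ('pass') and computes nothing: omitted)
  if is_exotic then ["Exotics", "O"]
  else if is_pacific then ["South Pacific -- All", "I"]
  else ["Australia", "P"]

-- ===== PORT B =====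
-- region = {port: code} built once from the three constant lists
def pvRegion : PySem.Dict String String :=
  (pvExotics.map (fun p => (p, "O"))).foldl (fun d pc => d.insert pc.1 pc.2)
    ((pvSouthPacific.map (fun p => (p, "I"))).foldl (fun d pc => d.insert pc.1 pc.2)
      ((pvAustralia.map (fun p => (p, "P"))).foldl (fun d pc => d.insert pc.1 pc.2) PySem.Dict.empty))

def match_by_meta_alt (param : List (List (String × String))) : List String :=
  -- for port in param[1:]: code = region.get(port['PortName']); if code == 'O': … elif code == 'I': …
  let fl := (param.drop 1).foldl
    (fun (fl : Bool × Bool) d =>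
      let code := pvRegion.get? ((pvPortName d).getD "")
      if code == some "O" then (true, fl.2)
      else if code == some "I" then (fl.1, true)
      else fl) (false, false)
  if fl.1 then ["Exotics", "O"]
  else if fl.2 then ["South Pacific -- All", "I"]
  else ["Australia", "P"]

-- ===== PRECONDITION & SPEC =====
-- Pre_ excludes exactly the inputs where the Python raises KeyError: some element after the first
-- has no 'PortName' key (both A and B raise there).
def Pre_match_by_meta (param : List (List (String × String))) : Prop :=
  ((param.drop 1).all (fun d => d.any (fun kv => kv.1 == "PortName"))) = true
instance (param : List (List (String × String))) : Decidable (Pre_match_by_meta param) := by unfold Pre_match_by_meta; infer_instance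
def pvWitness_match_by_meta : (List (List (String × String))) := [[], [("PortName", "Noumea")], [("PortName", "Sydney")]]

def Spec_match_by_meta (param : List (List (String × String))) (out : List String) : Prop := out = match_by_meta_alt param
instance (param : List (List (String × String))) (out : List String) : Decidable (Spec_match_by_meta param out) := by unfold Spec_match_by_meta; infer_instance

-- ===== CLAIM (what is proved, stated in full; the proofs are below) =====
def Claim_equal_match_by_meta : Prop := ∀ (param : List (List (String × String))), Dom_match_by_meta param → Pre_match_by_meta param → Spec_match_by_meta param (match_by_meta param)

-- ===== LEMMAS AND PROOFS =====

theorem ports_list_eq (param : List (List (String × String))) :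
    (PySem.List.pyRange 0 (param.length : Int) 1).foldl
      (fun acc i => if i == 0 then acc
                    else acc ++ [(pvPortName (PySem.List.pyGetD param i [])).getD ""]) []
    = (param.drop 1).map (fun d => (pvPortName d).getD "") := by
  rcases param with _ | ⟨d0, rest⟩
  · simp [PySem.List.pyRange_one_eq_nil (le_refl 0)]
  · rw [PySem.List.pyRange_one_cons (by push_cast [List.length_cons]; omega)]
    rw [List.foldl_cons]
    simp only [beq_self_eq_true, if_true]
    have hcg := PySem.List.foldl_congr_mem
      (f := fun (acc : List String) (i : Int) => if i == 0 then acc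
              else acc ++ [(pvPortName (PySem.List.pyGetD (d0 :: rest) i [])).getD ""])
      (g := fun (acc : List String) (i : Int) =>
              acc ++ [(pvPortName (PySem.List.pyGetD (d0 :: rest) i [])).getD ""])
      (l := PySem.List.pyRange (0 + 1) (((d0 :: rest).length : Int)) 1)
      (init := ([] : List String))
      (by
        intro acc x hx
        have hx1 := (PySem.List.mem_pyRange_one.mp hx).1
        have hne : (x == (0 : Int)) = false := by simp; omega
        simp [hne])
    rw [hcg, PySem.List.foldl_append_singleton_eq_map]
    have h := PySem.List.map_pyGetD_pyRange' (xs := d0 :: rest) (a := 1) (d := ([] : List (String × String))) (by norm_num)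
    rw [show ((0:Int) + 1) = 1 by norm_num,
        show (fun (i : Int) => (pvPortName (PySem.List.pyGetD (d0 :: rest) i [])).getD "")
           = (fun d => (pvPortName d).getD "") ∘ (fun (j : Int) => PySem.List.pyGetD (d0 :: rest) j []) from rfl,
        ← List.map_map, h]
    simp

-- A's flag loop: foldl over a category list with 'if element in ports_list: flag = True'
theorem foldl_flag (p : String → Bool) (l : List String) (b : Bool) :
    l.foldl (fun b e => if p e then true else b) b = (b || l.any p) := by
  induction l generalizing b with
  | nil => simp
  | cons x xs ih =>
    rw [List.foldl_cons, List.any_cons]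
    by_cases h : p x
    · rw [if_pos h, ih]; simp [h]
    · rw [if_neg h, ih]; simp [h]

-- B's single pass computes exactly the two 'any' flags
theorem foldl_flags (l : List (List (String × String))) (fl : Bool × Bool) :
    l.foldl (fun (fl : Bool × Bool) d =>
        if pvRegion.get? ((pvPortName d).getD "") == some "O" then (true, fl.2)
        else if pvRegion.get? ((pvPortName d).getD "") == some "I" then (fl.1, true)
        else fl) fl
    = (fl.1 || l.any (fun d => pvRegion.get? ((pvPortName d).getD "") == some "O"),
       fl.2 || l.any (fun d => pvRegion.get? ((pvPortName d).getD "") == some "I")) := by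
  induction l generalizing fl with
  | nil => simp
  | cons x xs ih =>
    rw [List.foldl_cons, List.any_cons, List.any_cons]
    by_cases h1 : pvRegion.get? ((pvPortName x).getD "") = some "O"
    · rw [if_pos (by simp [h1]), ih]
      simp [h1]
    · by_cases h2 : pvRegion.get? ((pvPortName x).getD "") = some "I"
      · rw [if_neg (by simp [h1]), if_pos (by simp [h2]), ih]
        simp [h2]
      · have e1 : (pvRegion.get? ((pvPortName x).getD "") == some "O") = false := by simp [h1]
        have e2 : (pvRegion.get? ((pvPortName x).getD "") == some "I") = false := by simp [h2]
        rw [if_neg (by simp [h1]), if_neg (by simp [h2]), ih, e1, e2]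
        simp

theorem get?_insert_const (l : List String) (c : String) (d : PySem.Dict String String) (s : String) :
    ((l.map (fun p => (p, c))).foldl (fun d pc => d.insert pc.1 pc.2) d).get? s
      = if s ∈ l then some c else d.get? s := by
  induction l generalizing d with
  | nil => simp
  | cons x xs ih =>
    rw [List.map_cons, List.foldl_cons, ih, PySem.Dict.get?_insert]
    by_cases hx : s = x
    · simp [hx]
    · by_cases hm : s ∈ xs <;> simp [hx, hm]

theorem region_get? (s : String) :
    pvRegion.get? s = if s ∈ pvExotics then some "O"
      else if s ∈ pvSouthPacific then some "I"
      else if s ∈ pvAustralia then some "P" else none := by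
  unfold pvRegion
  rw [get?_insert_const, get?_insert_const, get?_insert_const]
  simp [PySem.Dict.get?_empty]

theorem region_O (s : String) : pvRegion.get? s = some "O" ↔ s ∈ pvExotics := by
  rw [region_get?]
  split_ifs with h1 h2 h3 <;> simp_all

theorem region_I (s : String) : pvRegion.get? s = some "I" ↔ s ∈ pvSouthPacific := by
  rw [region_get?]
  split_ifs with h1 h2 h3 <;> simp_all
  simp only [pvExotics, List.mem_cons, List.not_mem_nil, or_false] at h1
  rcases h1 with rfl | rfl | rfl | rfl <;> decide

theorem any_swap (cat : List String) (l : List (List (String × String))) (c : String)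
    (hc : ∀ s, pvRegion.get? s = some c ↔ s ∈ cat) :
    cat.any (fun e => (l.map (fun d => (pvPortName d).getD "")).contains e)
      = l.any (fun d => pvRegion.get? ((pvPortName d).getD "") == some c) := by
  rw [Bool.eq_iff_iff]
  simp only [List.any_eq_true, List.contains_iff_mem, beq_iff_eq, List.mem_map]
  constructor
  · rintro ⟨e, he, d, hd, hfd⟩; exact ⟨d, hd, by rw [hfd]; exact (hc e).mpr he⟩
  · rintro ⟨d, hd, hg⟩; exact ⟨_, (hc _).mp hg, d, hd, rfl⟩

-- ===== VERDICT (by name: the statement is the Claim_ definition above) =====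
theorem match_by_meta_spec : Claim_equal_match_by_meta := by
  intro param _ _
  show match_by_meta param = match_by_meta_alt param
  unfold match_by_meta match_by_meta_alt
  simp only [ports_list_eq]
  rw [foldl_flags]
  rw [foldl_flag, foldl_flag,
      any_swap pvExotics _ "O" region_O, any_swap pvSouthPacific _ "I" region_I]
  simp only [Bool.false_or]
  cases hO : ((param.drop 1).any fun d => pvRegion.get? ((pvPortName d).getD "") == some "O") with
  | true => simp
  | false =>
    cases hP : ((param.drop 1).any fun d => pvRegion.get? ((pvPortName d).getD "") == some "I") with
    | true => simp
    | false => simp
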